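-- pv_equiv track=rewrite | github.com/NEU-Nerds/chompy4 | util.py | newNodesRec
-- ===== SOURCE A (Python) =====
-- def newNodesRec(n, part):
-- 	#break case, means part has grown to be n long (square board shape)
-- 	if len(part) == n:
-- 		return [tuple(part)]
-- 	else:
-- 		nodes = []
-- 		#go through all the possiblities for this row
-- 		for i in range(0, part[-1] + 1):
-- 			#add all the possiblities for the rest of the rows recursively
-- 			nodes = nodes + newNodesRec(n, part + [i])
-- 		return nodes
-- ===== SOURCE B (Python) =====
-- def newNodesRec(n, part):
--     # Iterative level-by-level (BFS) expansion instead of recursion.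
--     frontier = [list(part)]
--     for _ in range(n - len(part)):
--         frontier = [p + [i] for p in frontier for i in range(p[-1] + 1)]
--     return [tuple(p) for p in frontier]
-- ===== Notes on version B (the rewrite author's own statement) =====
-- stated objective: alternative
-- what changed: Replaces the per-row recursion with an iterative level-by-level (breadth-first) expansion: the frontier of partial shapes is expanded n-len(part) times by one list comprehension, yielding the same lexicographic leaf order without any recursion. Pre_ excludes inputs with len(part) > n, outside the function's intended domain: there A never reaches its base case (it diverges with RecursionError when the last entry is >= 0, and returns [] from an empty loop otherwise), while B's level expansion runs zero steps and returns the input itself.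
-- outside the precondition, e.g. on newNodesRec(0, [-1]): A returns [], B returns [(-1,)]
import Mathlib
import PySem

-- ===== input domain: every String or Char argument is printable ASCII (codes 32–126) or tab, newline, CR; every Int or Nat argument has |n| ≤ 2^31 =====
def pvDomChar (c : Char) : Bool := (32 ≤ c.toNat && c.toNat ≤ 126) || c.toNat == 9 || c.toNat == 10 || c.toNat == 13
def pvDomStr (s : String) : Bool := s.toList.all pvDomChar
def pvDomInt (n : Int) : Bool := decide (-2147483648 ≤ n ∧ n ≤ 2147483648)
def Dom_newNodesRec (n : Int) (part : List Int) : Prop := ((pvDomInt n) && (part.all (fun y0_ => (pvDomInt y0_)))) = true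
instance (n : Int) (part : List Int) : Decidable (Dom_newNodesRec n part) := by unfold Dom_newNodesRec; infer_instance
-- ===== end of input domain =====

-- B replaces A's recursion by an iterative level-by-level (breadth-first) frontier expansion; same return value on Pre_.

-- ===== PORT A =====
-- Literal port of the recursive enumeration. Python recurses on part, whose length grows
-- toward n; the port carries the exact termination counter gap = (n - len(part)).toNat,
-- decremented once per recursive call. The 'gap = 0' branch (reachable only when
-- part.length > n) is a totality guard: there the Python either diverges
-- (RecursionError, last element ≥ 0) or returns [] from an empty loop — all outside Pre_.
def newNodesRecAux (n : Int) (gap : Nat) (part : List Int) : List (List Int) :=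
  if (part.length : Int) = n then [part]
  else
    match PySem.List.pyGet? part (-1) with
    | none => []   -- Python raises IndexError here (part = []); outside Pre_
    | some last =>
      match gap with
      | 0 => []
      | g + 1 =>
        (PySem.List.pyRange 0 (last + 1) 1).foldl
          (fun nodes i => nodes ++ newNodesRecAux n g (part ++ [i])) []

def newNodesRec (n : Int) (part : List Int) : List (List Int) :=
  newNodesRecAux n (n - (part.length : Int)).toNat part

-- ===== PORT B =====
-- p[-1] inside the comprehension: Python raises on empty p; the port's default 0 is never
-- used inside Pre_ (every frontier element is nonempty there).
def newNodesRec_alt (n : Int) (part : List Int) : List (List Int) :=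
  (PySem.List.pyRange 0 (n - (part.length : Int)) 1).foldl
    (fun frontier _ =>
      frontier.flatMap (fun p =>
        (PySem.List.pyRange 0 ((PySem.List.pyGet? p (-1)).getD 0 + 1) 1).map
          (fun i => p ++ [i])))
    [part]

-- ===== PRECONDITION & SPEC =====
-- Pre_ excludes inputs with len(part) > n, outside the function's intended domain: there A never
-- reaches its base case (diverging when the last entry is ≥ 0, returning [] from an empty loop
-- otherwise), while B returns [part]; it also excludes part = [] with len ≠ n, where A raises IndexError.
def Pre_newNodesRec (n : Int) (part : List Int) : Prop :=
  (part.length : Int) = n ∨ (part ≠ [] ∧ (part.length : Int) < n)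
instance (n : Int) (part : List Int) : Decidable (Pre_newNodesRec n part) := by
  unfold Pre_newNodesRec; infer_instance

def pvWitness_newNodesRec : Int × List Int := (4, [2, 1])

def Spec_newNodesRec (n : Int) (part : List Int) (out : List (List Int)) : Prop := out = newNodesRec_alt n part
instance (n : Int) (part : List Int) (out : List (List Int)) : Decidable (Spec_newNodesRec n part out) := by unfold Spec_newNodesRec; infer_instance

-- ===== CLAIM (what is proved, stated in full; the proofs are below) =====
def Claim_equal_newNodesRec : Prop := ∀ (n : Int) (part : List Int), Dom_newNodesRec n part → Pre_newNodesRec n part → Spec_newNodesRec n part (newNodesRec n part)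

-- ===== LEMMAS AND PROOFS =====

-- one breadth-first expansion step of B
def pvExpand (fr : List (List Int)) : List (List Int) :=
  fr.flatMap (fun p =>
    (PySem.List.pyRange 0 ((PySem.List.pyGet? p (-1)).getD 0 + 1) 1).map (fun i => p ++ [i]))

theorem pvFoldl_const_iterate (l : List Int) (s : List (List Int)) :
    l.foldl (fun fr _ => pvExpand fr) s = pvExpand^[l.length] s := by
  induction l generalizing s with
  | nil => rfl
  | cons x xs ih => simp [List.foldl, ih, Function.iterate_succ_apply]

theorem pvAlt_eq_iterate (n : Int) (part : List Int) :
    newNodesRec_alt n part = pvExpand^[(n - (part.length : Int)).toNat] [part] := by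
  unfold newNodesRec_alt
  rw [show (fun frontier (_ : Int) =>
        frontier.flatMap (fun p =>
          (PySem.List.pyRange 0 ((PySem.List.pyGet? p (-1)).getD 0 + 1) 1).map
            (fun i => p ++ [i]))) = (fun fr _ => pvExpand fr) from rfl]
  rw [pvFoldl_const_iterate, PySem.List.length_pyRange_one]
  congr 1; omega

theorem pvExpand_flatMap (l : List (List Int)) (k : Nat) :
    pvExpand^[k] l = l.flatMap (fun p => pvExpand^[k] [p]) := by
  induction k generalizing l with
  | zero => simp
  | succ k ih =>
    rw [Function.iterate_succ_apply, ih (pvExpand l)]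
    have h1 : pvExpand l = l.flatMap (fun p => pvExpand [p]) := by
      simp [pvExpand]
    rw [h1, List.flatMap_assoc]
    refine List.flatMap_congr ?_
    intro p _
    rw [← ih (pvExpand [p]), ← Function.iterate_succ_apply]

theorem pvMain (k : Nat) : ∀ (n : Int) (part : List Int), part ≠ [] →
    (part.length : Int) + k = n → newNodesRecAux n k part = pvExpand^[k] [part] := by
  induction k with
  | zero =>
    intro n part _ hlen
    unfold newNodesRecAux
    simp [show (part.length : Int) = n by omega]
  | succ k ih =>
    intro n part hne hlen
    obtain ⟨last, hlast⟩ : ∃ L, PySem.List.pyGet? part (-1) = some L := by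
      rw [PySem.List.pyGet?_neg_one]
      exact ⟨part.getLast hne, List.getLast?_eq_some_getLast hne⟩
    unfold newNodesRecAux
    rw [if_neg (by omega), hlast]
    change (PySem.List.pyRange 0 (last + 1) 1).foldl
        (fun nodes i => nodes ++ newNodesRecAux n k (part ++ [i])) [] = _
    rw [Function.iterate_succ_apply]
    have hone : pvExpand [part] =
        (PySem.List.pyRange 0 (last + 1) 1).map (fun i => part ++ [i]) := by
      simp [pvExpand, hlast]
    rw [hone, pvExpand_flatMap]
    rw [PySem.List.foldl_append_eq_flatMap]
    rw [List.flatMap_map]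
    simp only [List.nil_append]
    refine List.flatMap_congr ?_
    intro i _
    exact ih n (part ++ [i]) (by simp) (by simp; omega)

-- ===== VERDICT (by name: the statement is the Claim_ definition above) =====
theorem newNodesRec_spec : Claim_equal_newNodesRec := by
  intro n part _ hpre
  unfold Spec_newNodesRec
  rw [pvAlt_eq_iterate]
  unfold newNodesRec
  rcases hpre with h | ⟨hne, hlt⟩
  · rw [show (n - (part.length : Int)).toNat = 0 by omega]
    unfold newNodesRecAux
    simp [h]
  · exact pvMain (n - (part.length : Int)).toNat n part hne (by omega)
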